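-- pv_equiv track=rewrite | github.com/katarinaetfpos/Burrows_Wheeler_FM_index | bwt_fm.py | calc_checkpoints
-- ===== SOURCE A (Python) =====
-- def calc_checkpoints(s, step):
--     """ count the number of letters for each step and
--         return list of the counts"""
--     A = {}  # letter count
--     C = []  # checkpoints
--     for i, c in enumerate(s):
--         if i % step == 0:
--             C.append(A.copy())
--         if A.get(c):
--             A[c] += 1
--         else:
--             A[c] = 1
--     return C
-- ===== SOURCE B (Python) =====
-- def calc_checkpoints(s, step):
--     """count the number of letters for each step and return list of the counts"""
--     C = []
--     for i in range(len(s)):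
--         if i % step == 0:
--             counts = {}
--             for c in s[:i]:
--                 counts[c] = counts.get(c, 0) + 1
--             C.append(counts)
--     return C
-- ===== Notes on version B (the rewrite author's own statement) =====
-- stated objective: alternative
-- what changed: Replaces the single incremental pass (one running dict snapshotted via copy at each checkpoint) by independent per-checkpoint counting: for each index i with i % step == 0 a fresh dict counting the letters of the prefix s[:i] is built from scratch.
import Mathlib
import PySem

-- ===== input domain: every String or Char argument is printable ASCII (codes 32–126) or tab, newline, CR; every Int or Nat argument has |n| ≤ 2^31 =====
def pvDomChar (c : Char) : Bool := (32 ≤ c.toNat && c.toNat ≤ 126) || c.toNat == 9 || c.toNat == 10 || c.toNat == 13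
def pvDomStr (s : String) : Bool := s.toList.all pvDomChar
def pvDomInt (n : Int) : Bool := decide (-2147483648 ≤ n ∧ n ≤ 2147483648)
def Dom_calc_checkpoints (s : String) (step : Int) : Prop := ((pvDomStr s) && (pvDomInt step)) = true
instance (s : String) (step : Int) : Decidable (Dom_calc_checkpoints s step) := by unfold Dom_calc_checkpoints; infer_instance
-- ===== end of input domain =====

-- B replaces A's single incremental pass with a running dict by independent fresh prefix counts at each checkpoint (alternative decomposition, not faster).


-- ===== PORT A =====
-- 'for i, c in enumerate(s)' as structural recursion carrying the index i, the running dict A and the checkpoint list C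
def calcLoopA (step : Int) : List Char → Int → PySem.Dict String Int → List (List (String × Int)) → List (List (String × Int))
  | [], _, _, C => C
  | c :: rest, i, A, C =>
    let C' := if PySem.Int.mod i step = 0 then C ++ [A.items] else C
    let key := String.ofList [c]
    let A' := match A.get? key with
      | none => A.insert key 1                 -- else branch: A[c] = 1
      | some v => if v = 0 then A.insert key 1 -- A.get(c) falsy
                  else A.insert key (v + 1)    -- A[c] += 1
    calcLoopA step rest (i + 1) A' C'

def calc_checkpoints (s : String) (step : Int) : List (List (String × Int)) :=
  calcLoopA step s.toList 0 PySem.Dict.empty []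

-- ===== PORT B =====
-- counts = {}; for c in prefix: counts[c] = counts.get(c, 0) + 1
def countPrefix (cs : List Char) : PySem.Dict String Int :=
  cs.foldl (fun d c => d.insert (String.ofList [c]) (d.getD (String.ofList [c]) 0 + 1)) PySem.Dict.empty

def calc_checkpoints_alt (s : String) (step : Int) : List (List (String × Int)) :=
  (PySem.List.pyRange 0 (s.toList.length) 1).foldl
    (fun C i => if PySem.Int.mod i step = 0
                then C ++ [(countPrefix (PySem.List.slice s.toList none (some i))).items]
                else C) []

-- ===== PRECONDITION & SPEC =====
-- Pre_ excludes step = 0 with a non-empty string: there both A and B raise ZeroDivisionError at 'i % step'.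
def Pre_calc_checkpoints (s : String) (step : Int) : Prop := s = "" ∨ step ≠ 0
instance (s : String) (step : Int) : Decidable (Pre_calc_checkpoints s step) := by unfold Pre_calc_checkpoints; infer_instance
def pvWitness_calc_checkpoints : String × Int := ("abcab", 2)

def Spec_calc_checkpoints (s : String) (step : Int) (out : List (List (String × Int))) : Prop := out = calc_checkpoints_alt s step
instance (s : String) (step : Int) (out : List (List (String × Int))) : Decidable (Spec_calc_checkpoints s step out) := by unfold Spec_calc_checkpoints; infer_instance

-- ===== CLAIM (what is proved, stated in full; the proofs are below) =====
def Claim_equal_calc_checkpoints : Prop := ∀ (s : String) (step : Int), Dom_calc_checkpoints s step → Pre_calc_checkpoints s step → Spec_calc_checkpoints s step (calc_checkpoints s step)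

-- ===== LEMMAS AND PROOFS =====

-- A's branchy dict update is exactly B's unconditional 'insert (getD + 1)'
theorem updA_eq (d : PySem.Dict String Int) (k : String) :
    (match d.get? k with
      | none => d.insert k 1
      | some v => if v = 0 then d.insert k 1 else d.insert k (v + 1))
    = d.insert k (d.getD k 0 + 1) := by
  cases h : d.get? k with
  | none => simp [PySem.Dict.getD_eq_get?_getD, h]
  | some v =>
    by_cases hv : v = 0 <;> simp [PySem.Dict.getD_eq_get?_getD, h, hv]

theorem calcLoop_inv (step : Int) (full : List Char) :
    ∀ (rest pre : List Char) (C : List (List (String × Int))), pre ++ rest = full →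
    calcLoopA step rest ((pre.length : Nat) : Int) (countPrefix pre) C =
    (PySem.List.pyRange (pre.length : Int) (full.length : Int) 1).foldl
      (fun C i => if PySem.Int.mod i step = 0
                  then C ++ [(countPrefix (PySem.List.slice full none (some i))).items]
                  else C) C := by
  intro rest
  induction rest with
  | nil =>
    intro pre C h
    have : pre = full := by simpa using h
    subst this
    rw [PySem.List.pyRange_one_eq_nil (le_refl _)]
    rfl
  | cons c rest' ih =>
    intro pre C h
    have hlen : (pre.length : Int) < (full.length : Int) := by
      have := congrArg List.length h
      simp at this; omega
    rw [PySem.List.pyRange_one_cons hlen]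
    simp only [List.foldl_cons]
    have hslice : PySem.List.slice full none (some ((pre.length : Nat) : Int)) = pre := by
      rw [PySem.List.slice_to_natCast, ← h]
      simp
    rw [hslice]
    show calcLoopA step (c :: rest') ((pre.length : Nat) : Int) (countPrefix pre) C = _
    rw [calcLoopA]
    rw [updA_eq]
    have hA' : (countPrefix pre).insert (String.ofList [c]) ((countPrefix pre).getD (String.ofList [c]) 0 + 1)
        = countPrefix (pre ++ [c]) := by
      simp [countPrefix, List.foldl_append]
    have hi : ((pre.length : Nat) : Int) + 1 = (((pre ++ [c]).length : Nat) : Int) := by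
      simp
    rw [hA', hi]
    exact ih (pre ++ [c]) _ (by simpa using h)

-- ===== VERDICT (by name: the statement is the Claim_ definition above) =====
theorem calc_checkpoints_spec : Claim_equal_calc_checkpoints := by
  intro s step _ _
  unfold Spec_calc_checkpoints calc_checkpoints calc_checkpoints_alt
  have := calcLoop_inv step s.toList s.toList [] [] rfl
  simpa [countPrefix] using this
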